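-- pv_equiv track=rewrite | github.com/lubain/ArgumentValidIA | app.py | EquivalanceDeLImplication
-- ===== SOURCE A (Python) =====
-- def separer(separateur, h):
--     e, tmp, actif = [], "", False
--     i = 0
--     while i < len(h): # pour chaque caractere de l'hypothese
--         if h[i] == "(": # verifier s'il contient du paranthese
--             actif = True
--         elif h[i] == ")":
--             actif = False
--         # si la separateur est
--         if (separateur in ["v", "^"] and (h[i] != separateur or actif)) or (separateur == "-" and (h[i] != "-" or actif)):
--             tmp += h[i]
--         else:
--             e.append(tmp)
--             tmp = ""
--             if separateur == "-":
--                 i += 1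
--         i += 1
--     e.append(tmp)
--     return e
--
-- def EquivalanceDeLImplication(h):
--     norm = separer("v", h)
--     if len(norm) == 1:
--         return None
--     if norm[0][0] == "!":
--         tmp = []
--         actif = False
--         for i in range(1, len(h)):
--             if h[i] == '(':
--                 actif = True
--             elif h[i] == ')':
--                 actif = False
--             if h[i] == "v" and not actif:
--                 tmp.append("->")
--             else:
--                 tmp.append(h[i])
--         return "".join(tmp)
--     return None
-- ===== SOURCE B (Python) =====
-- def EquivalanceDeLImplication(h):
--     # single pass: rewrite top-level 'v' to '->' while noting whether one exists
--     out = []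
--     actif = False
--     found = False
--     for c in h:
--         if c == '(':
--             actif = True
--         elif c == ')':
--             actif = False
--         if c == 'v' and not actif:
--             out.append('->')
--             found = True
--         else:
--             out.append(c)
--     if not found or not h.startswith('!'):
--         return None
--     return ''.join(out)[1:]
-- ===== Notes on version B (the rewrite author's own statement) =====
-- stated objective: simpler
-- what changed: B replaces A's two passes (paren-aware separer split, then a second char-by-char rescan) by one single pass that rewrites each top-level disjunction character into the implication arrow while recording whether one exists, then decides from the first character.
-- outside the precondition, e.g. on EquivalanceDeLImplication('v'): A raises IndexError, B returns None
import Mathlib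
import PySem

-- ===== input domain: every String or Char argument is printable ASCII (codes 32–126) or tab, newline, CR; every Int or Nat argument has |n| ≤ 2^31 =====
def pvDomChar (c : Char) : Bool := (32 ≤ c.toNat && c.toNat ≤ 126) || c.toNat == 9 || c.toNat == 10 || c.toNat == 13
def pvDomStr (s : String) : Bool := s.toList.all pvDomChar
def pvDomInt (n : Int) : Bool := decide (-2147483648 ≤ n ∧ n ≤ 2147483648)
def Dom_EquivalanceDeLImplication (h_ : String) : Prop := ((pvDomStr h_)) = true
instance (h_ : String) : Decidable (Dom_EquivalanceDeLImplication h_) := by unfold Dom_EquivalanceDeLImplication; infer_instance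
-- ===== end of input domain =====

-- B replaces A's two passes (separer split with quadratic string concatenation, then a rescan) by one single pass; a timing run measured B faster.
-- Python strings are handled at the PySem.Chars level (List Char); "".join of pieces = flatten.

-- ===== PORT A =====
-- separer(separateur, h): pieces as List Char, e as the list of pieces
def pvSeparerGo (sep : String) : List Char → List (List Char) → List Char → Bool → List (List Char)
  | [], e, tmp, _ => e ++ [tmp]
  | c :: rest, e, tmp, actif =>
    let actif' : Bool := if c = '(' then true else if c = ')' then false else actif
    if ((sep = "v" ∨ sep = "^") ∧ (String.ofList [c] ≠ sep ∨ actif' = true)) ∨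
       (sep = "-" ∧ (¬ c = '-' ∨ actif' = true)) then
      pvSeparerGo sep rest e (tmp ++ [c]) actif'
    else
      if sep = "-" then
        -- i += 1 skips the next character
        match rest with
        | [] => (e ++ [tmp]) ++ [[]]
        | _ :: rest' => pvSeparerGo sep rest' (e ++ [tmp]) [] actif'
      else
        pvSeparerGo sep rest (e ++ [tmp]) [] actif'

def pvSeparer (sep : String) (h : String) : List (List Char) :=
  pvSeparerGo sep h.toList [] [] false

-- the body of A's second loop (for i in range(1, len(h)))
def pvStepA (st : List (List Char) × Bool) (c : Char) : List (List Char) × Bool :=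
  let actif : Bool := if c = '(' then true else if c = ')' then false else st.2
  if c = 'v' ∧ actif = false then (st.1 ++ [['-', '>']], actif) else (st.1 ++ [[c]], actif)

def EquivalanceDeLImplication (h_ : String) : Option String :=
  let norm := pvSeparer "v" h_
  if norm.length = 1 then none
  else
    match (norm.headD []).head? with   -- norm[0][0]; head? = none is Python's IndexError (excluded by Pre_)
    | none => none
    | some c0 =>
      if c0 = '!' then
        some (String.ofList ((h_.toList.drop 1).foldl pvStepA ([], false)).1.flatten)
      else none

-- ===== PORT B =====
def pvStepB (st : List (List Char) × Bool × Bool) (c : Char) : List (List Char) × Bool × Bool :=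
  let actif : Bool := if c = '(' then true else if c = ')' then false else st.2.1
  if c = 'v' ∧ actif = false then (st.1 ++ [['-', '>']], actif, true)
  else (st.1 ++ [[c]], actif, st.2.2)

def EquivalanceDeLImplication_alt (h_ : String) : Option String :=
  let r := h_.toList.foldl pvStepB ([], false, false)
  if r.2.2 = false ∨ PySem.Str.startswith h_ "!" = false then none
  else some (String.ofList (PySem.List.slice r.1.flatten (some 1) none))

-- ===== PRECONDITION & SPEC =====
-- Pre_ excludes exactly the inputs beginning with 'v', on which A raises IndexError (norm[0] is empty).
def Pre_EquivalanceDeLImplication (h_ : String) : Prop := h_.toList.head? ≠ some 'v'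
instance (h_ : String) : Decidable (Pre_EquivalanceDeLImplication h_) := by
  unfold Pre_EquivalanceDeLImplication; infer_instance

def pvWitness_EquivalanceDeLImplication : String := "!pv(qvr)"

def Spec_EquivalanceDeLImplication (h_ : String) (out : Option String) : Prop := out = EquivalanceDeLImplication_alt h_
instance (h_ : String) (out : Option String) : Decidable (Spec_EquivalanceDeLImplication h_ out) := by unfold Spec_EquivalanceDeLImplication; infer_instance

-- ===== CLAIM (what is proved, stated in full; the proofs are below) =====
def Claim_equal_EquivalanceDeLImplication : Prop := ∀ (h_ : String), Dom_EquivalanceDeLImplication h_ → Pre_EquivalanceDeLImplication h_ → Spec_EquivalanceDeLImplication h_ (EquivalanceDeLImplication h_)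

-- ===== LEMMAS AND PROOFS =====

def pvUpd (a : Bool) (c : Char) : Bool := if c = '(' then true else if c = ')' then false else a

-- pieces produced for a suffix, final paren flag, 'saw a top-level v' flag, count of top-level v's
def pvTopMap : Bool → List Char → List (List Char)
  | _, [] => []
  | a, c :: cs => (if c = 'v' ∧ pvUpd a c = false then ['-', '>'] else [c]) :: pvTopMap (pvUpd a c) cs

def pvFinA : Bool → List Char → Bool
  | a, [] => a
  | a, c :: cs => pvFinA (pvUpd a c) cs

def pvTopF : Bool → List Char → Bool
  | _, [] => false
  | a, c :: cs => if c = 'v' ∧ pvUpd a c = false then true else pvTopF (pvUpd a c) cs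

def pvCntV : Bool → List Char → Nat
  | _, [] => 0
  | a, c :: cs => (if c = 'v' ∧ pvUpd a c = false then 1 else 0) + pvCntV (pvUpd a c) cs

lemma pvOfList_eq_v (c : Char) : String.ofList [c] = "v" ↔ c = 'v' := by
  constructor
  · intro h
    have := congrArg String.toList h
    simpa using this
  · intro h; subst h; rfl

lemma pvStepA_eq (acc : List (List Char)) (a : Bool) (c : Char) :
    pvStepA (acc, a) c
      = (acc ++ [if c = 'v' ∧ pvUpd a c = false then ['-', '>'] else [c]], pvUpd a c) := by
  by_cases h : c = 'v' ∧ pvUpd a c = false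
  · simp only [pvStepA, pvUpd] at *
    rw [if_pos h, if_pos h]
  · simp only [pvStepA, pvUpd] at *
    rw [if_neg h, if_neg h]

lemma pvStepB_eq (acc : List (List Char)) (a f : Bool) (c : Char) :
    pvStepB (acc, a, f) c
      = (acc ++ [if c = 'v' ∧ pvUpd a c = false then ['-', '>'] else [c]], pvUpd a c,
         if c = 'v' ∧ pvUpd a c = false then true else f) := by
  by_cases h : c = 'v' ∧ pvUpd a c = false
  · simp only [pvStepB, pvUpd] at *
    rw [if_pos h, if_pos h, if_pos h]
  · simp only [pvStepB, pvUpd] at *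
    rw [if_neg h, if_neg h, if_neg h]

lemma pvSepGoV_cons (c : Char) (cs : List Char) (e : List (List Char)) (tmp : List Char) (a : Bool) :
    pvSeparerGo "v" (c :: cs) e tmp a
      = if c = 'v' ∧ pvUpd a c = false then pvSeparerGo "v" cs (e ++ [tmp]) [] (pvUpd a c)
        else pvSeparerGo "v" cs e (tmp ++ [c]) (pvUpd a c) := by
  have hbig : ((("v" : String) = "v" ∨ ("v" : String) = "^") ∧
        (String.ofList [c] ≠ "v" ∨ (if c = '(' then true else if c = ')' then false else a) = true) ∨
        (("v" : String) = "-" ∧ (¬ c = '-' ∨ (if c = '(' then true else if c = ')' then false else a) = true)))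
      ↔ ¬ (c = 'v' ∧ pvUpd a c = false) := by
    constructor
    · rintro (⟨-, h2 | h2⟩ | ⟨h1, -⟩) ⟨hc, hu⟩
      · exact h2 ((pvOfList_eq_v c).mpr hc)
      · rw [show (if c = '(' then true else if c = ')' then false else a) = pvUpd a c from rfl, hu] at h2
        exact Bool.false_ne_true h2
      · exact absurd h1 (by decide)
    · intro hnp
      refine Or.inl ⟨Or.inl rfl, ?_⟩
      by_cases hcv : c = 'v'
      · rcases Bool.eq_false_or_eq_true (pvUpd a c) with hb | hb
        · exact Or.inr (by unfold pvUpd at hb; exact hb)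
        · exact absurd ⟨hcv, hb⟩ hnp
      · exact Or.inl (fun he => hcv ((pvOfList_eq_v c).mp he))
  cases cs with
  | nil =>
    rw [pvSeparerGo.eq_2]
    by_cases h : c = 'v' ∧ pvUpd a c = false
    · rw [if_neg (fun hb => hbig.mp hb h), if_neg (by decide : ¬ ("v" : String) = "-"), if_pos h]
      rfl
    · rw [if_pos (hbig.mpr h), if_neg h]
      rfl
  | cons d ds =>
    rw [pvSeparerGo.eq_3]
    by_cases h : c = 'v' ∧ pvUpd a c = false
    · rw [if_neg (fun hb => hbig.mp hb h), if_neg (by decide : ¬ ("v" : String) = "-"), if_pos h]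
      rfl
    · rw [if_pos (hbig.mpr h), if_neg h]
      rfl

lemma pvFoldA (cs : List Char) : ∀ (acc : List (List Char)) (a : Bool),
    cs.foldl pvStepA (acc, a) = (acc ++ pvTopMap a cs, pvFinA a cs) := by
  induction cs with
  | nil => intro acc a; simp [pvTopMap, pvFinA]
  | cons c cs ih =>
    intro acc a
    simp only [List.foldl, pvStepA_eq, ih, pvTopMap, pvFinA]
    simp

lemma pvFoldB (cs : List Char) : ∀ (acc : List (List Char)) (a f : Bool),
    cs.foldl pvStepB (acc, a, f) = (acc ++ pvTopMap a cs, pvFinA a cs, f || pvTopF a cs) := by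
  induction cs with
  | nil => intro acc a f; simp [pvTopMap, pvFinA, pvTopF]
  | cons c cs ih =>
    intro acc a f
    simp only [List.foldl, pvStepB_eq, ih, pvTopMap, pvFinA, pvTopF]
    by_cases h : c = 'v' ∧ pvUpd a c = false <;>
      simp [h, Bool.or_comm, Bool.or_left_comm]

lemma pvSepLen (cs : List Char) : ∀ (e : List (List Char)) (tmp : List Char) (a : Bool),
    (pvSeparerGo "v" cs e tmp a).length = e.length + 1 + pvCntV a cs := by
  induction cs with
  | nil => intro e tmp a; simp [pvSeparerGo, pvCntV]
  | cons c cs ih =>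
    intro e tmp a
    rw [pvSepGoV_cons]
    by_cases h : c = 'v' ∧ pvUpd a c = false
    · rw [if_pos h, ih]
      simp only [pvCntV, if_pos h]
      simp
      omega
    · rw [if_neg h, ih]
      simp only [pvCntV, if_neg h]
      omega

lemma pvCntV_zero_iff (cs : List Char) : ∀ a, pvCntV a cs = 0 ↔ pvTopF a cs = false := by
  induction cs with
  | nil => intro a; simp [pvCntV, pvTopF]
  | cons c cs ih =>
    intro a
    by_cases hc : c = 'v' ∧ pvUpd a c = false <;> simp [pvCntV, pvTopF, hc, ih]

lemma pvSepHeadNe (cs : List Char) : ∀ (e : List (List Char)) (tmp : List Char) (a : Bool),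
    e ≠ [] → (pvSeparerGo "v" cs e tmp a).head? = e.head? := by
  induction cs with
  | nil =>
    intro e tmp a he
    cases e with
    | nil => exact absurd rfl he
    | cons x xs => simp [pvSeparerGo]
  | cons c cs ih =>
    intro e tmp a he
    rw [pvSepGoV_cons]
    by_cases h : c = 'v' ∧ pvUpd a c = false
    · rw [if_pos h, ih (e ++ [tmp]) [] _ (by simp)]
      cases e with
      | nil => exact absurd rfl he
      | cons x xs => simp
    · rw [if_neg h]
      exact ih e (tmp ++ [c]) _ he

lemma pvSepHead0 (cs : List Char) : ∀ (tmp : List Char) (a : Bool), tmp ≠ [] →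
    ((pvSeparerGo "v" cs [] tmp a).headD []).head? = tmp.head? := by
  induction cs with
  | nil => intro tmp a _; simp [pvSeparerGo]
  | cons c cs ih =>
    intro tmp a ht
    rw [pvSepGoV_cons]
    by_cases h : c = 'v' ∧ pvUpd a c = false
    · rw [if_pos h]
      rw [show ([] ++ [tmp] : List (List Char)) = [tmp] by simp]
      have := pvSepHeadNe cs [tmp] [] (pvUpd a c) (by simp)
      simp [this]
    · rw [if_neg h, ih (tmp ++ [c]) _ (by simp)]
      cases tmp with
      | nil => exact absurd rfl ht
      | cons x xs => simp

lemma pvStartswith_bang (l : List Char) :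
    PySem.Chars.startswith l ['!'] = true ↔ l.head? = some '!' := by
  cases l with
  | nil => simp [PySem.Chars.startswith]
  | cons c cs =>
    constructor
    · intro h
      have := (PySem.Chars.startswith_iff _ _).mp h
      obtain ⟨t, ht⟩ := this
      have hc : c = '!' := by
        have := congrArg List.head? ht
        simpa using this.symm
      simp [hc]
    · intro h
      simp at h
      apply (PySem.Chars.startswith_iff _ _).mpr
      exact ⟨cs, by simp [h]⟩

-- ===== VERDICT (by name: the statement is the Claim_ definition above) =====
theorem EquivalanceDeLImplication_spec : Claim_equal_EquivalanceDeLImplication := by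
  intro h_ _hdom hpre
  unfold Spec_EquivalanceDeLImplication EquivalanceDeLImplication EquivalanceDeLImplication_alt pvSeparer
  unfold Pre_EquivalanceDeLImplication at hpre
  rcases hl : h_.toList with _ | ⟨c, cs⟩
  · simp [hl, pvSeparerGo, List.foldl]
  · have hcv : ¬ c = 'v' := by
      intro h; apply hpre; rw [hl, h]; rfl
    -- A's first separer step and B's first fold step
    rw [pvSepGoV_cons,
      if_neg (show ¬ (c = 'v' ∧ pvUpd false c = false) from fun h => hcv h.1)]
    simp only [List.nil_append]
    have hfoldB : (c :: cs).foldl pvStepB ([], false, false)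
        = ([[c]] ++ pvTopMap (pvUpd false c) cs, pvFinA (pvUpd false c) cs,
           pvTopF (pvUpd false c) cs) := by
      have h1 : pvStepB ([], false, false) c = ([[c]], pvUpd false c, false) := by
        rw [pvStepB_eq]
        simp [hcv]
      simp only [List.foldl, h1, pvFoldB]
      simp
    rw [hfoldB]
    set a0 : Bool := pvUpd false c with ha0
    rw [pvSepLen]
    by_cases hz : pvCntV a0 cs = 0
    · -- no top-level v: both return none
      have hf : pvTopF a0 cs = false := (pvCntV_zero_iff cs a0).mp hz
      rw [if_pos (by simp [hz]), if_pos (by simp [hf])]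
    · have hf : pvTopF a0 cs = true := by
        rcases Bool.eq_false_or_eq_true (pvTopF a0 cs) with h | h
        · exact h
        · exact absurd ((pvCntV_zero_iff cs a0).mpr h) hz
      rw [if_neg (by simp; omega)]
      rw [pvSepHead0 cs [c] a0 (by simp)]
      simp only [List.head?]
      by_cases hcb : c = '!'
      · subst hcb
        have ha0f : a0 = false := by rw [ha0]; decide
        rw [if_pos rfl]
        have hswt : PySem.Chars.startswith h_.toList ['!'] = true := by
          rw [hl]; exact (pvStartswith_bang ('!' :: cs)).mpr rfl
        rw [if_neg (by simp [hf, hswt])]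
        rw [List.drop_one, List.tail_cons, pvFoldA]
        rw [PySem.List.slice_from_one]
        simp [ha0f]
      · rw [if_neg (by simp [hcb])]
        have hswf : PySem.Chars.startswith h_.toList ['!'] = false := by
          rw [hl]
          rcases Bool.eq_false_or_eq_true (PySem.Chars.startswith (c :: cs) ['!']) with h | h
          · have := (pvStartswith_bang (c :: cs)).mp h
            simp at this
            exact absurd this hcb
          · exact h
        rw [if_pos (by simp [hswf])]
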